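-- pv_equiv track=rewrite | github.com/Alatius/cavallinlatin | proofread/spurious_breaks.py | _strip_tags_with_positions
-- ===== SOURCE A (Python) =====
-- def _strip_tags_with_positions(text):
--     """Strip tags from text, returning (clean_text, mapping) where mapping[i]
--     gives the position in the original text for clean_text[i]."""
--     result = []
--     mapping = []
--     i = 0
--     while i < len(text):
--         if text[i] == '<':
--             end = text.find('>', i)
--             if end == -1:
--                 result.append(text[i])
--                 mapping.append(i)
--                 i += 1
--             else:
--                 i = end + 1
--         else:
--             result.append(text[i])
--             mapping.append(i)
--             i += 1
--     return ''.join(result), mapping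
-- ===== SOURCE B (Python) =====
-- def _strip_tags_with_positions(text):
--     """Strip tags from text, returning (clean_text, mapping) where mapping[i]
--     gives the position in the original text for clean_text[i]."""
--     # One linear pass with an in-tag state machine; a '<' only opens a tag
--     # if some '>' occurs at or after it (precomputed once via rfind), so an
--     # unterminated '<' and everything after it is kept literally.
--     last_gt = text.rfind('>')
--     result = []
--     mapping = []
--     in_tag = False
--     for i, ch in enumerate(text):
--         if in_tag:
--             if ch == '>':
--                 in_tag = False
--         elif ch == '<' and i <= last_gt:
--             in_tag = True
--         else:
--             result.append(ch)
--             mapping.append(i)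
--     return ''.join(result), mapping
-- ===== Notes on version B (the rewrite author's own statement) =====
-- stated objective: faster
-- what changed: A repeatedly calls text.find('>', i) and jumps the cursor past each tag; B precomputes the last '>' position once with rfind and then does a single linear pass with an in_tag state machine (a '<' only opens a tag if some '>' follows), which keeps unterminated '<' text literally just like A.
import Mathlib
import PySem

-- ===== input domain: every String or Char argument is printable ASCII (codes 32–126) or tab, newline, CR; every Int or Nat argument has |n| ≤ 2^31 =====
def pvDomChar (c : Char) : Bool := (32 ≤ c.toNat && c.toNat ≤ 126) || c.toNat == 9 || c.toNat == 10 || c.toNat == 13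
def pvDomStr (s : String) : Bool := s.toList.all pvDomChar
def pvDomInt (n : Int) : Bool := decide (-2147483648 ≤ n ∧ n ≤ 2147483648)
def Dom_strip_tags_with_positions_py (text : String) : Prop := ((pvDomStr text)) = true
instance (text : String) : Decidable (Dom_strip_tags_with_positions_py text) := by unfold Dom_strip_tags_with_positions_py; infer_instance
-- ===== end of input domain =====

-- B replaces A's find-and-jump loop (repeated text.find from the cursor) by one linear
-- pass with an in-tag state machine, made exact on unterminated '<' by precomputing the
-- last '>' position once (text.rfind); objective: faster (O(n) vs O(n^2) worst case).

-- ===== PORT A =====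
-- hand port of text.find('>', i): index of the first '>' in the remaining suffix
-- (exact: the needle is the single char '>', searched from the cursor onward)
def findGt : List Char → Option Nat
  | [] => none
  | c :: cs => if c = '>' then some 0 else (findGt cs).map (· + 1)

-- A's while-loop as recursion on the remaining suffix, carrying the absolute index i
def aLoop : List Char → Int → List Char × List Int
  | [], _ => ([], [])
  | c :: rest, i =>
    if c = '<' then
      match findGt (c :: rest) with
      | none =>
        let p := aLoop rest (i + 1)
        (c :: p.1, i :: p.2)
      | some e =>
        aLoop (List.drop (e + 1) (c :: rest)) (i + (e : Int) + 1)
    else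
      let p := aLoop rest (i + 1)
      (c :: p.1, i :: p.2)
termination_by cs _ => cs.length
decreasing_by
  all_goals simp [List.length_drop] <;> omega

def strip_tags_with_positions_py (text : String) : String × List Int :=
  let p := aLoop text.toList 0
  (String.ofList p.1, p.2)

-- ===== PORT B =====
-- hand port of text.rfind('>'): index of the last '>' in text, -1 if none (exact:
-- single-char needle, whole string)
def rlastGt : List Char → Option Nat
  | [] => none
  | c :: cs =>
    match rlastGt cs with
    | some k => some (k + 1)
    | none => if c = '>' then some 0 else none

def rfindGt (cs : List Char) : Int :=
  match rlastGt cs with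
  | some k => (k : Int)
  | none => -1

-- B's single for-loop over enumerate(text) with the in_tag flag
def bLoop (lastGt : Int) : List Char → Int → Bool → List Char × List Int
  | [], _, _ => ([], [])
  | c :: cs, i, inTag =>
    if inTag then
      if c = '>' then bLoop lastGt cs (i + 1) false
      else bLoop lastGt cs (i + 1) true
    else if c = '<' ∧ i ≤ lastGt then
      bLoop lastGt cs (i + 1) true
    else
      let p := bLoop lastGt cs (i + 1) false
      (c :: p.1, i :: p.2)

def strip_tags_with_positions_py_alt (text : String) : String × List Int :=
  let cs := text.toList
  let p := bLoop (rfindGt cs) cs 0 false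
  (String.ofList p.1, p.2)

-- ===== PRECONDITION & SPEC =====
def Spec_strip_tags_with_positions_py (text : String) (out : String × List Int) : Prop := out = strip_tags_with_positions_py_alt text
instance (text : String) (out : String × List Int) : Decidable (Spec_strip_tags_with_positions_py text out) := by unfold Spec_strip_tags_with_positions_py; infer_instance

-- ===== CLAIM (what is proved, stated in full; the proofs are below) =====
def Claim_equal_strip_tags_with_positions_py : Prop := ∀ (text : String), Dom_strip_tags_with_positions_py text → Spec_strip_tags_with_positions_py text (strip_tags_with_positions_py text)

-- ===== LEMMAS AND PROOFS =====

-- Invariant tying B's precomputed lastGt to the suffix starting at absolute index i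
def StInv (lastGt i : Int) (cs : List Char) : Prop :=
  match rlastGt cs with
  | some k => lastGt = i + (k : Int)
  | none => lastGt < i

theorem findGt_none_iff (cs : List Char) : findGt cs = none ↔ rlastGt cs = none := by
  induction cs with
  | nil => simp [findGt, rlastGt]
  | cons c cs ih =>
    by_cases hc : c = '>'
    · cases h : rlastGt cs <;> simp [findGt, rlastGt, hc, h]
    · cases h : rlastGt cs <;> simp [findGt, rlastGt, hc, h] <;> simp [ih, h]

theorem findGt_le_rlastGt (cs : List Char) (e k : Nat)
    (hf : findGt cs = some e) (hr : rlastGt cs = some k) : e ≤ k := by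
  induction cs generalizing e k with
  | nil => simp [findGt] at hf
  | cons c cs ih =>
    by_cases hc : c = '>'
    · simp [findGt, hc] at hf; omega
    · simp [findGt, hc] at hf
      obtain ⟨e', hfe, rfl⟩ := hf
      cases h : rlastGt cs with
      | none =>
        have : findGt cs = none := (findGt_none_iff cs).mpr h
        simp [this] at hfe
      | some k' =>
        simp [rlastGt, h] at hr
        have := ih e' k' hfe h
        omega

theorem rlastGt_drop (m : Nat) (cs : List Char) :
    rlastGt (List.drop m cs) =
      (rlastGt cs).bind (fun k => if m ≤ k then some (k - m) else none) := by
  induction cs generalizing m with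
  | nil => simp [rlastGt]
  | cons c cs ih =>
    cases m with
    | zero => cases h : rlastGt (c :: cs) <;> simp [h]
    | succ m =>
      simp only [List.drop_succ_cons, ih m]
      cases h : rlastGt cs with
      | none =>
        by_cases hc : c = '>' <;> simp [rlastGt, h, hc]
      | some k' =>
        simp only [rlastGt, h, Option.bind_some]
        by_cases hm : m ≤ k'
        · simp [hm, (by omega : m + 1 ≤ k' + 1)]
        · simp [hm]

theorem bLoop_skip (rest : List Char) (e : Nat) (hf : findGt rest = some e)
    (lastGt j : Int) :
    bLoop lastGt rest j true = bLoop lastGt (List.drop (e + 1) rest) (j + (e : Int) + 1) false := by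
  induction rest generalizing e j with
  | nil => simp [findGt] at hf
  | cons c rs ih =>
    by_cases hc : c = '>'
    · simp [findGt, hc] at hf
      subst hf
      simp [bLoop, hc]
    · simp [findGt, hc] at hf
      obtain ⟨e', hfe, rfl⟩ := hf
      have : bLoop lastGt (c :: rs) j true = bLoop lastGt rs (j + 1) true := by
        simp [bLoop, hc]
      rw [this, ih e' hfe (j + 1)]
      have hidx : j + 1 + (e' : Int) + 1 = j + ((e' + 1 : Nat) : Int) + 1 := by push_cast; ring
      rw [List.drop_succ_cons, hidx]

theorem inv_step (lastGt i : Int) (c : Char) (rest : List Char)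
    (h : StInv lastGt i (c :: rest)) : StInv lastGt (i + 1) rest := by
  unfold StInv at *
  cases hr : rlastGt rest with
  | some k' =>
    simp [rlastGt, hr] at h
    push_cast at h ⊢
    omega
  | none =>
    by_cases hc : c = '>' <;> simp [rlastGt, hr, hc] at h <;> omega

theorem loop_eq (n : Nat) : ∀ (cs : List Char), cs.length ≤ n → ∀ (i lastGt : Int),
    StInv lastGt i cs → aLoop cs i = bLoop lastGt cs i false := by
  induction n with
  | zero =>
    intro cs hlen i lastGt _
    have : cs = [] := by cases cs <;> simp_all
    subst this; simp [aLoop, bLoop]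
  | succ n ih =>
    intro cs hlen i lastGt hinv
    cases cs with
    | nil => simp [aLoop, bLoop]
    | cons c rest =>
      have hrest : rest.length ≤ n := by simp at hlen; omega
      by_cases hc : c = '<'
      · subst hc
        cases hf : findGt ('<' :: rest) with
        | none =>
          -- no '>' left: both keep the '<'
          have hrn : rlastGt ('<' :: rest) = none := (findGt_none_iff _).mp hf
          have hlt : ¬ i ≤ lastGt := by
            unfold StInv at hinv; simp [hrn] at hinv; omega
          have hinv' : StInv lastGt (i + 1) rest := inv_step _ _ _ _ hinv
          have hrec := ih rest hrest (i + 1) lastGt hinv'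
          simp [aLoop, hf, bLoop, hlt, hrec]
        | some e =>
          -- a '>' exists: A jumps past it, B enters in_tag and drops up to it
          obtain ⟨k, hk⟩ : ∃ k, rlastGt ('<' :: rest) = some k := by
            cases h : rlastGt ('<' :: rest) with
            | none => exact absurd ((findGt_none_iff _).mpr h) (by simp [hf])
            | some k => exact ⟨k, rfl⟩
          have hik : lastGt = i + (k : Int) := by
            unfold StInv at hinv; simp [hk] at hinv; exact hinv
          have hle : i ≤ lastGt := by omega
          have hek : e ≤ k := findGt_le_rlastGt _ _ _ hf hk
          have hfr : findGt rest = some (e - 1) ∧ 1 ≤ e := by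
            simp [findGt] at hf
            obtain ⟨e', h1, h2⟩ := hf
            exact ⟨by rw [← h2]; simpa using h1, by omega⟩
          obtain ⟨hfr', he1⟩ := hfr
          have hA : aLoop ('<' :: rest) i = aLoop (List.drop (e + 1) ('<' :: rest)) (i + (e : Int) + 1) := by
            simp [aLoop, hf]
          have hB1 : bLoop lastGt ('<' :: rest) i false = bLoop lastGt rest (i + 1) true := by
            simp [bLoop, hle]
          have hdrop : List.drop (e + 1) ('<' :: rest) = List.drop ((e - 1) + 1) rest := by
            rw [List.drop_succ_cons]; congr 1; omega
          have hB2 : bLoop lastGt rest (i + 1) true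
              = bLoop lastGt (List.drop ((e - 1) + 1) rest) (i + 1 + ((e - 1 : Nat) : Int) + 1) false :=
            bLoop_skip rest (e - 1) hfr' lastGt (i + 1)
          have hidx : i + (e : Int) + 1 = i + 1 + ((e - 1 : Nat) : Int) + 1 := by
            have h1 : ((e - 1 : Nat) : Int) = (e : Int) - 1 := by omega
            rw [h1]; ring
          have hinv' : StInv lastGt (i + (e : Int) + 1) (List.drop (e + 1) ('<' :: rest)) := by
            unfold StInv
            rw [rlastGt_drop (e + 1) ('<' :: rest), hk]
            by_cases hcase : e + 1 ≤ k
            · have h2 : ((k - (e + 1) : Nat) : Int) = (k : Int) - (e : Int) - 1 := by omega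
              simp only [hcase, if_pos, Option.bind_some]
              rw [h2]; omega
            · have hke : k = e := by omega
              simp only [hcase, Option.bind_some]
              simp
              omega
          have hlen' : (List.drop (e + 1) ('<' :: rest)).length ≤ n := by
            simp [List.length_drop] at *; omega
          rw [hA, ih _ hlen' _ _ hinv', hB1, hB2, hdrop, hidx]
      · -- ordinary character: both keep it
        have hinv' : StInv lastGt (i + 1) rest := inv_step _ _ _ _ hinv
        have hrec := ih rest hrest (i + 1) lastGt hinv'
        simp [aLoop, hc, bLoop, hrec]

-- ===== VERDICT (by name: the statement is the Claim_ definition above) =====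
theorem strip_tags_with_positions_py_spec : Claim_equal_strip_tags_with_positions_py := by
  intro text _
  unfold Spec_strip_tags_with_positions_py strip_tags_with_positions_py strip_tags_with_positions_py_alt
  have hinv : StInv (rfindGt text.toList) 0 text.toList := by
    unfold StInv rfindGt
    cases h : rlastGt text.toList <;> simp
  rw [loop_eq text.toList.length text.toList le_rfl 0 (rfindGt text.toList) hinv]
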